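-- pv_equiv track=rewrite | github.com/bhavya2403/Learning-Python | Learning/Algorithms/DynamicProgramming/bitonic_subsequence.py | bitonicSubsequence
-- ===== SOURCE A (Python) =====
-- def bitonicSubsequence(arr, n):
--     leftInc = [i for i in arr]
--     leftInc[0] = arr[0]
--     rightDec = [i for i in arr]
--     rightDec[n-1] = arr[n-1]
--
--     for i in range(1, n):
--         for j in range(i):
--             if arr[i]>arr[j] and leftInc[i] < leftInc[j]+arr[i]:
--                 leftInc[i] = leftInc[j]+arr[i]
--
--     for i in range(n-2, -1, -1):
--         for j in range(n-1, i, -1):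
--             if arr[i]>arr[j] and rightDec[i] < rightDec[j]+arr[i]:
--                 rightDec[i] = rightDec[j]+arr[i]
--
--     return max(leftInc[i]+rightDec[i]-arr[i] for i in range(n))
-- ===== SOURCE B (Python) =====
-- # Max-sum bitonic subsequence via a lazily-built segment tree over the value range:
-- # each direction's best-ending sums are computed with prefix-max queries keyed by value,
-- # O(n log C) instead of A's O(n^2) nested scans.
--
-- _K = 33                # tree spans value positions [0, 2**33)
-- _OFF = 1 << 31        # shift values to non-negative positions
--
--
-- def _top(t):
--     if t is None:
--         return 0
--     if isinstance(t, int):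
--         return t
--     return t[0]
--
--
-- def _update(t, k, pos, s):
--     if k == 0:
--         return max(_top(t), s)
--     half = 1 << (k - 1)
--     if t is None:
--         l, r = None, None
--     else:
--         l, r = t[1], t[2]
--     if pos < half:
--         l = _update(l, k - 1, pos, s)
--     else:
--         r = _update(r, k - 1, pos - half, s)
--     return [max(_top(l), _top(r)), l, r]
--
--
-- def _query(t, k, p):
--     # max(0, stored values at positions < p)
--     if t is None or p <= 0:
--         return 0
--     if p >= (1 << k):
--         return _top(t)
--     half = 1 << (k - 1)
--     if p <= half:
--         return _query(t[1], k - 1, p)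
--     return max(_top(t[1]), _query(t[2], k - 1, p - half))
--
--
-- def _sweep(xs):
--     t = None
--     out = []
--     for v in xs:
--         s = v + _query(t, _K, v + _OFF)
--         out.append(s)
--         t = _update(t, _K, v + _OFF, s)
--     return out
--
--
-- def bitonicSubsequence(arr, n):
--     xs = [arr[i] for i in range(n)]
--     left = _sweep(xs)
--     right = _sweep(xs[::-1])[::-1]
--     return max(l + r - v for l, r, v in zip(left, right, xs))
-- ===== Notes on version B (the rewrite author's own statement) =====
-- stated objective: alternative
-- what changed: A relaxes each position against all earlier/later positions with two O(n^2) nested loops; B computes each direction's best-ending sums with a lazily-built segment tree over the shifted value range (prefix-max query by value, point max-update), removing the inner scans entirely.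
import Mathlib
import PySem

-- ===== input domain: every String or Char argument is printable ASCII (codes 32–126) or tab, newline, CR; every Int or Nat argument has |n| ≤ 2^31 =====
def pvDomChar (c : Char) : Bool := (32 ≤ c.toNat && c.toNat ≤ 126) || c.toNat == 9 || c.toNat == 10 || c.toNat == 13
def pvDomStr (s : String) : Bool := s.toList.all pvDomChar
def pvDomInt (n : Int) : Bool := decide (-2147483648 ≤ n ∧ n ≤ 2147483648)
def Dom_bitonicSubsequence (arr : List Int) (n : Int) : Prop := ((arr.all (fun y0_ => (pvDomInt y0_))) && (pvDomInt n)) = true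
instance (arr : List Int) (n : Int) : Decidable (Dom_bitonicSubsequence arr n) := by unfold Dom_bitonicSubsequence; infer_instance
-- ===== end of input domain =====

-- B replaces A's two nested relaxation loops by per-direction sweeps that query a
-- lazily-built segment tree over the shifted value range (prefix-max by value, point max-update).

-- ===== PORT A =====
def bitonicSubsequence (arr : List Int) (n : Int) : Int :=
  -- leftInc = [i for i in arr]; leftInc[0] = arr[0]
  let leftInc0 := PySem.List.pySetD (arr.map (fun i => i)) 0 (PySem.List.pyGetD arr 0 0)
  -- rightDec = [i for i in arr]; rightDec[n-1] = arr[n-1]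
  let rightDec0 := PySem.List.pySetD (arr.map (fun i => i)) (n-1) (PySem.List.pyGetD arr (n-1) 0)
  -- for i in range(1, n): for j in range(i): …
  let leftInc := (PySem.List.pyRange 1 n 1).foldl (fun li i =>
      (PySem.List.pyRange 0 i 1).foldl (fun li j =>
        if PySem.List.pyGetD arr i 0 > PySem.List.pyGetD arr j 0 ∧
           PySem.List.pyGetD li i 0 < PySem.List.pyGetD li j 0 + PySem.List.pyGetD arr i 0 then
          PySem.List.pySetD li i (PySem.List.pyGetD li j 0 + PySem.List.pyGetD arr i 0)
        else li) li) leftInc0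
  -- for i in range(n-2, -1, -1): for j in range(n-1, i, -1): …
  let rightDec := (PySem.List.pyRange (n-2) (-1) (-1)).foldl (fun rd i =>
      (PySem.List.pyRange (n-1) i (-1)).foldl (fun rd j =>
        if PySem.List.pyGetD arr i 0 > PySem.List.pyGetD arr j 0 ∧
           PySem.List.pyGetD rd i 0 < PySem.List.pyGetD rd j 0 + PySem.List.pyGetD arr i 0 then
          PySem.List.pySetD rd i (PySem.List.pyGetD rd j 0 + PySem.List.pyGetD arr i 0)
        else rd) rd) rightDec0
  -- return max(leftInc[i]+rightDec[i]-arr[i] for i in range(n))  (max of empty raises: dead under Pre_)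
  match (PySem.List.pyRange 0 n 1).map (fun i =>
      PySem.List.pyGetD leftInc i 0 + PySem.List.pyGetD rightDec i 0 - PySem.List.pyGetD arr i 0) with
  | [] => 0
  | h :: t => t.foldl max h

-- ===== PORT B =====
-- segment-tree node: None -> nil (all-zero subtree), int leaf -> leaf, [max, l, r] -> node
inductive pvST : Type
  | nil : pvST
  | leaf : Int → pvST
  | node : Int → pvST → pvST → pvST
deriving DecidableEq, Repr

-- def _top(t)
def pvTop : pvST → Int
  | pvST.nil => 0
  | pvST.leaf v => v
  | pvST.node m _ _ => m

-- t[1] / t[2] (None has no children; a leaf is never asked for children by the algorithm)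
def pvChildL : pvST → pvST
  | pvST.node _ l _ => l
  | _ => pvST.nil
def pvChildR : pvST → pvST
  | pvST.node _ _ r => r
  | _ => pvST.nil

-- def _update(t, k, pos, s)
def pvUpdate : Nat → pvST → Int → Int → pvST
  | 0, t, _, s => pvST.leaf (max (pvTop t) s)
  | k+1, t, pos, s =>
      let l := pvChildL t
      let r := pvChildR t
      if pos < (2:Int) ^ k then
        let l' := pvUpdate k l pos s
        pvST.node (max (pvTop l') (pvTop r)) l' r
      else
        let r' := pvUpdate k r (pos - (2:Int) ^ k) s
        pvST.node (max (pvTop l) (pvTop r')) l r'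

-- def _query(t, k, p)
def pvQuery : Nat → pvST → Int → Int
  | 0, t, p =>
      if t = pvST.nil ∨ p ≤ 0 then 0
      else if (2:Int) ^ (0:Nat) ≤ p then pvTop t
      else 0        -- unreachable for integer p (0 < p < 1)
  | k+1, t, p =>
      if t = pvST.nil ∨ p ≤ 0 then 0
      else if (2:Int) ^ (k+1) ≤ p then pvTop t
      else if p ≤ (2:Int) ^ k then pvQuery k (pvChildL t) p
      else max (pvTop (pvChildL t)) (pvQuery k (pvChildR t) (p - (2:Int) ^ k))

-- one iteration of the loop in def _sweep(xs)
def pvSweepStep (st : pvST × List Int) (v : Int) : pvST × List Int :=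
  let s := v + pvQuery 33 st.1 (v + 2147483648)
  (pvUpdate 33 st.1 (v + 2147483648) s, st.2 ++ [s])

-- def _sweep(xs)
def pvSweep (xs : List Int) : List Int :=
  (xs.foldl pvSweepStep (pvST.nil, [])).2

def bitonicSubsequence_alt (arr : List Int) (n : Int) : Int :=
  let xs := (PySem.List.pyRange 0 n 1).map (fun i => PySem.List.pyGetD arr i 0)   -- [arr[i] for i in range(n)]
  let left := pvSweep xs
  -- _sweep(xs[::-1])[::-1]
  let right := (PySem.List.slice? (pvSweep ((PySem.List.slice? xs none none (-1)).getD [])) none none (-1)).getD []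
  match (left.zip (right.zip xs)).map (fun p => p.1 + p.2.1 - p.2.2) with
  | [] => 0
  | h :: t => t.foldl max h

-- ===== PRECONDITION & SPEC =====
-- Pre_ is exactly where Python A returns: it raises (IndexError/ValueError) unless 1 ≤ n ≤ len(arr).
def Pre_bitonicSubsequence (arr : List Int) (n : Int) : Prop := 1 ≤ n ∧ n ≤ (arr.length : Int)
instance (arr : List Int) (n : Int) : Decidable (Pre_bitonicSubsequence arr n) := by
  unfold Pre_bitonicSubsequence; infer_instance

def pvWitness_bitonicSubsequence : List Int × Int := ([1, 5, 2, 4, 3], 5)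

def Spec_bitonicSubsequence (arr : List Int) (n : Int) (out : Int) : Prop := out = bitonicSubsequence_alt arr n
instance (arr : List Int) (n : Int) (out : Int) : Decidable (Spec_bitonicSubsequence arr n out) := by
  unfold Spec_bitonicSubsequence; infer_instance

-- ===== CLAIM (what is proved, stated in full; the proofs are below) =====
def Claim_equal_bitonicSubsequence : Prop := ∀ (arr : List Int) (n : Int), Dom_bitonicSubsequence arr n → Pre_bitonicSubsequence arr n → Spec_bitonicSubsequence arr n (bitonicSubsequence arr n)

-- ===== LEMMAS AND PROOFS =====

-- reference functional form of the per-direction DP (proof-only; characterises both ports)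
def pvStep (xs out : List Int) (v : Int) : List Int :=
  out ++ [v + (((xs.zip out).filter (fun p => p.1 < v)).map Prod.snd).foldl max 0]

def pvEnds (xs : List Int) : List Int := xs.foldl (pvStep xs) []

theorem pvZipAppendLeft {α β : Type} (xs ys : List α) (out : List β)
    (h : out.length ≤ xs.length) : (xs ++ ys).zip out = xs.zip out := by
  induction xs generalizing out with
  | nil => cases out with
    | nil => simp
    | cons b bs => simp at h
  | cons a as ih => cases out with
    | nil => simp
    | cons b bs => simp_all

theorem pvStep_len (xs out : List Int) (v : Int) :
    (pvStep xs out v).length = out.length + 1 := by simp [pvStep]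

theorem pvFoldlStep_len (xs : List Int) : ∀ (l out : List Int),
    (l.foldl (pvStep xs) out).length = out.length + l.length := by
  intro l
  induction l with
  | nil => simp
  | cons v l ih => intro out; simp [ih, pvStep_len]; omega

theorem pvEnds_len (xs : List Int) : (pvEnds xs).length = xs.length := by
  simpa using pvFoldlStep_len xs xs []

theorem pvFoldlStep_ext (xs ext : List Int) : ∀ (l out : List Int),
    out.length + l.length ≤ xs.length →
    l.foldl (pvStep (xs ++ ext)) out = l.foldl (pvStep xs) out := by
  intro l
  induction l with
  | nil => simp
  | cons v l ih =>
    intro out h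
    have h1 : out.length ≤ xs.length := by simp at h; omega
    have hstep : pvStep (xs ++ ext) out v = pvStep xs out v := by
      simp [pvStep, pvZipAppendLeft xs ext out h1]
    simp only [List.foldl_cons, hstep]
    exact ih _ (by simp [pvStep_len] at *; omega)

theorem pvEnds_snoc (l : List Int) (v : Int) :
    pvEnds (l ++ [v]) = pvStep l (pvEnds l) v := by
  unfold pvEnds
  rw [List.foldl_append]
  rw [pvFoldlStep_ext l [v] l [] (by simp)]
  simp only [List.foldl_cons, List.foldl_nil]
  have : pvStep (l ++ [v]) (l.foldl (pvStep l) []) v = pvStep l (l.foldl (pvStep l) []) v := by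
    have hl : (l.foldl (pvStep l) []).length ≤ l.length := by
      simpa using (pvFoldlStep_len l l []).le
    simp [pvStep, pvZipAppendLeft l [v] _ hl]
  exact this

theorem pvEnds_take (ys : List Int) : ∀ k : Nat, pvEnds (ys.take k) = (pvEnds ys).take k := by
  induction ys using List.reverseRecOn with
  | nil => simp [pvEnds]
  | append_singleton l v ih =>
    intro k
    by_cases hk : k ≤ l.length
    · rw [List.take_append_of_le_length hk, ih, pvEnds_snoc, pvStep,
        List.take_append_of_le_length (by simp [pvEnds_len]; omega)]
    · have hk' : l.length + 1 ≤ k := by omega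
      rw [List.take_of_length_le (by simp; omega), List.take_of_length_le (by simp [pvEnds_len]; omega)]

-- candidate list in index form
theorem pvZipEqMapRange (a b : List Int) (h : a.length = b.length) :
    a.zip b = (List.range a.length).map (fun q => (a.getD q 0, b.getD q 0)) := by
  induction a generalizing b with
  | nil => simp
  | cons x a ih =>
    cases b with
    | nil => simp at h
    | cons y b =>
      simp only [List.zip_cons_cons, List.length_cons, List.range_succ_eq_map, List.map_cons,
        List.map_map]
      rw [List.cons_eq_cons]
      refine ⟨rfl, ?_⟩
      rw [ih b (by simpa using h)]
      apply List.map_congr_left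
      intro q _
      rfl

-- running strict-improvement loop is an offset max-fold
theorem pvMaxfold (t : Int) : ∀ (l : List Int) (m : Int), 0 ≤ m →
    l.foldl (fun a e => if a < e + t then e + t else a) (t + m) = t + l.foldl max m := by
  intro l
  induction l with
  | nil => simp
  | cons e l ih =>
    intro m hm
    simp only [List.foldl_cons]
    by_cases h : m < e
    · rw [if_pos (by omega)]
      have : e + t = t + max m e := by omega
      rw [this, ih _ (by omega)]
    · rw [if_neg (by omega)]
      have : max m e = m := by omega
      rw [this]; exact ih _ hm

-- the A-side scalar inner loop in range form equals t0 + max over filtered mapped candidates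
theorem pvScalarLoop (X E : Nat → Int) (t0 : Int) (c : Nat) :
    (List.range c).foldl (fun a q => if t0 > X q ∧ a < E q + t0 then E q + t0 else a) t0
    = t0 + (((List.range c).filter (fun q => decide (X q < t0))).map E).foldl max 0 := by
  have h1 : (List.range c).foldl (fun a q => if t0 > X q ∧ a < E q + t0 then E q + t0 else a) t0
      = (List.range c).foldl (fun a q => if X q < t0 then (if a < E q + t0 then E q + t0 else a) else a) t0 := by
    apply PySem.List.foldl_congr_mem
    intro acc x _
    by_cases h : X x < t0
    · by_cases h2 : acc < E x + t0 <;> simp [h, h2]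
    · simp [h]
  rw [h1, PySem.List.foldl_ite_eq_foldl_filter]
  rw [← List.foldl_map (f := E) (g := fun a e => if a < e + t0 then e + t0 else a)]
  have := pvMaxfold t0 ((((List.range c).filter (fun q => decide (X q < t0))).map E)) 0 le_rfl
  simpa using this

theorem pvGetD_take (ys : List Int) {q p : Nat} (h : q < p) :
    (ys.take p).getD q 0 = ys.getD q 0 := by
  simp [List.getD_eq_getElem?_getD, h]

theorem pvEnds_getD (ys : List Int) (p : Nat) (hp : p < ys.length) :
    (pvEnds ys).getD p 0 = ys.getD p 0 +
      (((List.range p).filter (fun q => decide (ys.getD q 0 < ys.getD p 0))).map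
        (fun q => (pvEnds ys).getD q 0)).foldl max 0 := by
  have hlenl : (ys.take p).length = p := by simp; omega
  have hlenE : (pvEnds (ys.take p)).length = p := by rw [pvEnds_len]; exact hlenl
  have htake : ys.take (p+1) = ys.take p ++ [ys.getD p 0] := by
    rw [List.take_add_one]
    simp [List.getElem?_eq_getElem hp, List.getD_eq_getElem?_getD]
  have h1 : pvEnds (ys.take (p+1)) = pvEnds (ys.take p) ++
      [ys.getD p 0 + ((((ys.take p).zip (pvEnds (ys.take p))).filter
        (fun c : Int × Int => c.1 < ys.getD p 0)).map Prod.snd).foldl max 0] := by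
    rw [htake, pvEnds_snoc]; rfl
  have h2 : (pvEnds ys).getD p 0 = (pvEnds (ys.take p) ++
      [ys.getD p 0 + ((((ys.take p).zip (pvEnds (ys.take p))).filter
        (fun c : Int × Int => c.1 < ys.getD p 0)).map Prod.snd).foldl max 0]).getD p 0 := by
    rw [← h1, pvEnds_take, pvGetD_take _ (Nat.lt_succ_self p)]
  rw [h2]
  have h3 : ∀ (l : List Int) (w : Int), (l ++ [w]).getD l.length 0 = w := by
    intro l w; simp [List.getD_eq_getElem?_getD]
  have h3' := h3 (pvEnds (ys.take p)) (ys.getD p 0 + ((((ys.take p).zip (pvEnds (ys.take p))).filter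
      (fun c : Int × Int => c.1 < ys.getD p 0)).map Prod.snd).foldl max 0)
  rw [hlenE] at h3'
  rw [h3']
  congr 1
  rw [pvZipEqMapRange _ _ (by rw [hlenE, hlenl]), hlenl, List.filter_map, List.map_map]
  have hf : List.filter ((fun c : Int × Int => decide (c.1 < ys.getD p 0)) ∘
        (fun q => ((ys.take p).getD q 0, (pvEnds (ys.take p)).getD q 0))) (List.range p)
      = List.filter (fun q => decide (ys.getD q 0 < ys.getD p 0)) (List.range p) := by
    apply List.filter_congr
    intro q hq
    simp only [List.mem_range] at hq
    simp [Function.comp, List.getElem?_take_of_lt hq]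
  rw [hf]
  congr 1
  apply List.map_congr_left
  intro q hq
  have hq' : q < p := by
    have := List.mem_of_mem_filter hq
    simpa using this
  simp only [Function.comp]
  rw [pvEnds_take, pvGetD_take _ hq']

theorem pvGetD_set_self (base : List Int) (i : Nat) (a : Int) (h : i < base.length) :
    (base.set i a).getD i 0 = a := by
  simp [List.getD_eq_getElem?_getD, List.getElem?_set_self h]

theorem pvGetD_set_ne (base : List Int) (i : Nat) (a : Int) (j : Int)
    (hj : 0 ≤ j) (hne : j.toNat ≠ i) :
    PySem.List.pyGetD (base.set i a) j 0 = PySem.List.pyGetD base j 0 := by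
  have : j = ((j.toNat : Nat) : Int) := by omega
  rw [this]
  simp only [PySem.List.pyGetD_natCast]
  simp [List.getD_eq_getElem?_getD, List.getElem?_set_ne (Ne.symm hne)]

theorem pvInnerSet (arr : List Int) (i : Nat) (t : Int) : ∀ (js : List Int) (base : List Int) (a : Int),
    i < base.length →
    (∀ j ∈ js, 0 ≤ j ∧ j.toNat ≠ i) →
    js.foldl (fun li j => if t > PySem.List.pyGetD arr j 0 ∧
        PySem.List.pyGetD li (i : Int) 0 < PySem.List.pyGetD li j 0 + t then
        PySem.List.pySetD li (i : Int) (PySem.List.pyGetD li j 0 + t) else li) (base.set i a)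
    = base.set i (js.foldl (fun acc j => if t > PySem.List.pyGetD arr j 0 ∧
        acc < PySem.List.pyGetD base j 0 + t then PySem.List.pyGetD base j 0 + t else acc) a) := by
  intro js
  induction js with
  | nil => intro base a _ _; simp
  | cons j js ih =>
    intro base a hi hjs
    obtain ⟨hj0, hjne⟩ := hjs j (List.mem_cons_self)
    have hgi : PySem.List.pyGetD (base.set i a) (i : Int) 0 = a := by
      simp only [PySem.List.pyGetD_natCast]
      exact pvGetD_set_self base i a hi
    have hgj : PySem.List.pyGetD (base.set i a) j 0 = PySem.List.pyGetD base j 0 :=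
      pvGetD_set_ne base i a j hj0 hjne
    have hset : ∀ v : Int, PySem.List.pySetD (base.set i a) (i : Int) v = base.set i v := by
      intro v
      simp only [PySem.List.pySetD_natCast]
      exact List.set_set ..
    simp only [List.foldl_cons, hgi, hgj]
    by_cases hc : t > PySem.List.pyGetD arr j 0 ∧ a < PySem.List.pyGetD base j 0 + t
    · rw [if_pos hc, if_pos hc, hset]
      exact ih base _ hi (fun x hx => hjs x (List.mem_cons_of_mem _ hx))
    · rw [if_neg hc, if_neg hc]
      exact ih base a hi (fun x hx => hjs x (List.mem_cons_of_mem _ hx))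

theorem pvSetGetSelf (l : List Int) (i : Nat) (h : i < l.length) : l.set i (l.getD i 0) = l := by
  rw [List.getD_eq_getElem l 0 h]; exact List.set_getElem_self h

theorem pvGetD_append_right (p s : List Int) (k : Nat) :
    (p ++ s).getD (p.length + k) 0 = s.getD k 0 := by
  simp [List.getD_eq_getElem?_getD, List.getElem?_append_right]

theorem pvGetD_append_left (p s : List Int) (k : Nat) (h : k < p.length) :
    (p ++ s).getD k 0 = p.getD k 0 := by
  simp [List.getD_eq_getElem?_getD, List.getElem?_append_left h]

-- one outer step of the left loop, at position ip = k+1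
theorem pvLeftStep (arr : List Int) (ip : Nat) (hip : 0 < ip) (hlt : ip < arr.length) :
    (PySem.List.pyRange 0 (ip : Int) 1).foldl (fun li j =>
        if PySem.List.pyGetD arr (ip : Int) 0 > PySem.List.pyGetD arr j 0 ∧
           PySem.List.pyGetD li (ip : Int) 0 < PySem.List.pyGetD li j 0 + PySem.List.pyGetD arr (ip : Int) 0 then
          PySem.List.pySetD li (ip : Int) (PySem.List.pyGetD li j 0 + PySem.List.pyGetD arr (ip : Int) 0)
        else li) ((pvEnds arr).take ip ++ arr.drop ip)
    = (pvEnds arr).take (ip + 1) ++ arr.drop (ip + 1) := by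
  set base := (pvEnds arr).take ip ++ arr.drop ip with hbase
  have hlenP : ((pvEnds arr).take ip).length = ip := by
    simp [pvEnds_len]; omega
  have hlenbase : base.length = arr.length := by
    simp [hbase, pvEnds_len]; omega
  have hbg : base.getD ip 0 = arr.getD ip 0 := by
    have := pvGetD_append_right ((pvEnds arr).take ip) (arr.drop ip) 0
    rw [hlenP] at this
    simpa [List.getD_eq_getElem?_getD] using this
  rw [← pvSetGetSelf base ip (by rw [hlenbase]; exact hlt)]
  simp only [PySem.List.pyGetD_natCast]
  have hIS := pvInnerSet arr ip (arr.getD ip 0) (PySem.List.pyRange 0 (ip : Int) 1) base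
      (base.getD ip 0) (by rw [hlenbase]; exact hlt) (by
    intro j hj
    rw [PySem.List.mem_pyRange_one] at hj
    exact ⟨hj.1, by omega⟩)
  simp only [PySem.List.pyGetD_natCast] at hIS
  rw [hIS]
  rw [hbg]
  have hrange : PySem.List.pyRange 0 (ip : Int) 1 = (List.range ip).map (fun (k : Nat) => (0 : Int) + (k : Int)) := by
    rw [PySem.List.pyRange_one]
    congr 2
  rw [hrange, List.foldl_map]
  have hcongr : (List.range ip).foldl (fun (acc : Int) (k : Nat) =>
        if arr.getD ip 0 > PySem.List.pyGetD arr ((0 : Int) + (k : Int)) 0 ∧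
           acc < PySem.List.pyGetD base ((0 : Int) + (k : Int)) 0 + arr.getD ip 0 then
          PySem.List.pyGetD base ((0 : Int) + (k : Int)) 0 + arr.getD ip 0 else acc) (arr.getD ip 0)
      = (List.range ip).foldl (fun (acc : Int) (k : Nat) =>
        if arr.getD ip 0 > arr.getD k 0 ∧
           acc < (pvEnds arr).getD k 0 + arr.getD ip 0 then
          (pvEnds arr).getD k 0 + arr.getD ip 0 else acc) (arr.getD ip 0) := by
    apply PySem.List.foldl_congr_mem
    intro acc k hk
    rw [List.mem_range] at hk
    have h0 : ((0 : Int) + (k : Int)) = ((k : Nat) : Int) := by omega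
    rw [h0]
    simp only [PySem.List.pyGetD_natCast]
    rw [hbase, pvGetD_append_left _ _ _ (by rw [hlenP]; exact hk), pvGetD_take _ hk]
  rw [hcongr]
  have hsl := pvScalarLoop (fun k => arr.getD k 0) (fun k => (pvEnds arr).getD k 0)
      (arr.getD ip 0) ip
  simp only [] at hsl
  rw [hsl]
  have hchar := pvEnds_getD arr ip hlt
  rw [← hchar]
  have hsplit : arr.drop ip = arr.getD ip 0 :: arr.drop (ip + 1) := by
    rw [List.drop_eq_getElem_cons hlt, List.getD_eq_getElem arr 0 hlt]
  have htk : (pvEnds arr).take (ip + 1) = (pvEnds arr).take ip ++ [(pvEnds arr).getD ip 0] := by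
    rw [List.take_add_one]
    congr 1
    rw [List.getD_eq_getElem?_getD, List.getElem?_eq_getElem (by rw [pvEnds_len]; omega)]
    rfl
  rw [hbase, hsplit, htk]
  rw [← hlenP]
  rw [List.set_append]
  simp

theorem pvTakeOne (l : List Int) (h : 0 < l.length) : l.take 1 = [l.getD 0 0] := by
  cases l with
  | nil => simp at h
  | cons a t => simp [List.getD]

theorem pvConsDrop (l : List Int) (h : 0 < l.length) : l = [l.getD 0 0] ++ l.drop 1 := by
  cases l with
  | nil => simp at h
  | cons a t => simp [List.getD]

theorem pvLeftLoop (arr : List Int) (n : Int) (h1 : 1 ≤ n) (h2 : n ≤ (arr.length : Int)) :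
    (PySem.List.pyRange 1 n 1).foldl (fun li i =>
        (PySem.List.pyRange 0 i 1).foldl (fun li j =>
          if PySem.List.pyGetD arr i 0 > PySem.List.pyGetD arr j 0 ∧
             PySem.List.pyGetD li i 0 < PySem.List.pyGetD li j 0 + PySem.List.pyGetD arr i 0 then
            PySem.List.pySetD li i (PySem.List.pyGetD li j 0 + PySem.List.pyGetD arr i 0)
          else li) li) arr
    = (pvEnds arr).take n.toNat ++ arr.drop n.toNat := by
  have hmlen : n.toNat ≤ arr.length := by omega
  have hm1 : 1 ≤ n.toNat := by omega
  have hrange : PySem.List.pyRange 1 n 1 = (List.range (n.toNat - 1)).map (fun (k : Nat) => (1 : Int) + (k : Int)) := by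
    rw [PySem.List.pyRange_one]
    congr 2
    omega
  rw [hrange, List.foldl_map]
  have aux : ∀ t, t ≤ n.toNat - 1 →
      (List.range t).foldl (fun li (k : Nat) =>
        (PySem.List.pyRange 0 ((1 : Int) + (k : Int)) 1).foldl (fun li j =>
          if PySem.List.pyGetD arr ((1 : Int) + (k : Int)) 0 > PySem.List.pyGetD arr j 0 ∧
             PySem.List.pyGetD li ((1 : Int) + (k : Int)) 0 < PySem.List.pyGetD li j 0 + PySem.List.pyGetD arr ((1 : Int) + (k : Int)) 0 then
            PySem.List.pySetD li ((1 : Int) + (k : Int)) (PySem.List.pyGetD li j 0 + PySem.List.pyGetD arr ((1 : Int) + (k : Int)) 0)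
          else li) li) arr
      = (pvEnds arr).take (t+1) ++ arr.drop (t+1) := by
    intro t
    induction t with
    | zero =>
      intro _
      simp only [List.range_zero, List.foldl_nil]
      rw [pvTakeOne (pvEnds arr) (by rw [pvEnds_len]; omega)]
      have h0 : (pvEnds arr).getD 0 0 = arr.getD 0 0 := by
        rw [pvEnds_getD arr 0 (by omega)]
        simp
      rw [h0]
      exact pvConsDrop arr (by omega)
    | succ t ih =>
      intro ht
      rw [List.range_succ, List.foldl_append, ih (by omega), List.foldl_cons, List.foldl_nil]
      rw [show (1 : Int) + (t : Int) = ((t + 1 : Nat) : Int) by omega]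
      exact pvLeftStep arr (t+1) (by omega) (by omega)
  rw [aux (n.toNat - 1) le_rfl]
  congr 2 <;> omega

theorem pvGetD_rev (l : List Int) (k : Nat) (h : k < l.length) :
    l.reverse.getD k 0 = l.getD (l.length - 1 - k) 0 := by
  rw [List.getD_eq_getElem l.reverse 0 (by simpa using h),
      List.getD_eq_getElem l 0 (by omega), List.getElem_reverse]

theorem pvGetD_drop (l : List Int) (a k : Nat) :
    (l.drop a).getD k 0 = l.getD (a + k) 0 := by
  simp [List.getD_eq_getElem?_getD, List.getElem?_drop]

theorem pvSetMid (p s : List Int) (i : Nat) (h : i = p.length) (w x : Int) :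
    (p ++ ([x] ++ s)).set i w = p ++ ([w] ++ s) := by
  subst h
  rw [List.set_append]
  simp

theorem pvRightStep (arr : List Int) (n : Int) (h1 : 1 ≤ n) (h2 : n ≤ (arr.length : Int))
    (ip : Nat) (hlt : ip + 1 < n.toNat) :
    (PySem.List.pyRange (n-1) (ip : Int) (-1)).foldl (fun rd j =>
        if PySem.List.pyGetD arr (ip : Int) 0 > PySem.List.pyGetD arr j 0 ∧
           PySem.List.pyGetD rd (ip : Int) 0 < PySem.List.pyGetD rd j 0 + PySem.List.pyGetD arr (ip : Int) 0 then
          PySem.List.pySetD rd (ip : Int) (PySem.List.pyGetD rd j 0 + PySem.List.pyGetD arr (ip : Int) 0)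
        else rd)
      (arr.take (ip+1) ++ (pvEnds (arr.take n.toNat).reverse).reverse.drop (ip+1) ++ arr.drop n.toNat)
    = arr.take ip ++ (pvEnds (arr.take n.toNat).reverse).reverse.drop ip ++ arr.drop n.toNat := by
  set m := n.toNat with hm
  have hmlen : m ≤ arr.length := by omega
  set xsr := (arr.take m).reverse with hxsr
  have hxsrlen : xsr.length = m := by simp [hxsr]; omega
  have hElen : (pvEnds xsr).length = m := by rw [pvEnds_len]; exact hxsrlen
  set Rv := (pvEnds xsr).reverse with hRv
  have hRvlen : Rv.length = m := by simp [hRv, hElen]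
  set base := arr.take (ip+1) ++ Rv.drop (ip+1) ++ arr.drop m with hbase
  have hlenbase : base.length = arr.length := by
    simp [hbase, hRvlen]
    omega
  have htklen : (arr.take (ip+1)).length = ip + 1 := by
    simp only [List.length_take]; omega
  have hbg : base.getD ip 0 = arr.getD ip 0 := by
    rw [hbase, List.append_assoc, pvGetD_append_left _ _ _ (by rw [htklen]; omega),
        pvGetD_take _ (by omega)]
  have hbmid : ∀ j : Nat, ip < j → j < m → base.getD j 0 = Rv.getD j 0 := by
    intro j hj1 hj2
    calc base.getD j 0
        = ((arr.take (ip+1)) ++ (Rv.drop (ip+1) ++ arr.drop m)).getD ((arr.take (ip+1)).length + (j - (ip+1))) 0 := by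
          rw [hbase, List.append_assoc]
          congr 1
          rw [htklen]
          omega
      _ = (Rv.drop (ip+1) ++ arr.drop m).getD (j - (ip+1)) 0 := pvGetD_append_right _ _ _
      _ = (Rv.drop (ip+1)).getD (j - (ip+1)) 0 := by
          rw [pvGetD_append_left _ _ _ (by simp only [List.length_drop, hRvlen]; omega)]
      _ = Rv.getD ((ip+1) + (j - (ip+1))) 0 := pvGetD_drop _ _ _
      _ = Rv.getD j 0 := by congr 1; omega
  have etk : (List.take m arr).length = m := by simp only [List.length_take]; omega
  have hxsrget : ∀ k : Nat, k < m → xsr.getD k 0 = arr.getD (m - 1 - k) 0 := by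
    intro k hk
    rw [hxsr, pvGetD_rev _ _ (by rw [etk]; omega), etk, pvGetD_take _ (by omega)]
  have hRvget : ∀ j : Nat, j < m → Rv.getD j 0 = (pvEnds xsr).getD (m - 1 - j) 0 := by
    intro j hj
    rw [hRv, pvGetD_rev _ _ (by rw [hElen]; omega), hElen]
  rw [← pvSetGetSelf base ip (by rw [hlenbase]; omega)]
  simp only [PySem.List.pyGetD_natCast]
  have hIS := pvInnerSet arr ip (PySem.List.pyGetD arr (ip : Int) 0) (PySem.List.pyRange (n-1) (ip : Int) (-1)) base
      (base.getD ip 0) (by rw [hlenbase]; omega) (by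
    intro j hj
    rw [PySem.List.mem_pyRange_neg_one] at hj
    constructor
    · omega
    · omega)
  simp only [PySem.List.pyGetD_natCast] at hIS
  rw [hIS, hbg]
  have hrange : PySem.List.pyRange (n-1) (ip : Int) (-1)
      = (List.range (m - 1 - ip)).map (fun (k : Nat) => (n - 1) - (k : Int)) := by
    rw [PySem.List.pyRange_neg_one]
    congr 2
    omega
  rw [hrange, List.foldl_map]
  have hcongr : (List.range (m - 1 - ip)).foldl (fun (acc : Int) (k : Nat) =>
        if arr.getD ip 0 > PySem.List.pyGetD arr ((n - 1) - (k : Int)) 0 ∧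
           acc < PySem.List.pyGetD base ((n - 1) - (k : Int)) 0 + arr.getD ip 0 then
          PySem.List.pyGetD base ((n - 1) - (k : Int)) 0 + arr.getD ip 0 else acc) (arr.getD ip 0)
      = (List.range (m - 1 - ip)).foldl (fun (acc : Int) (k : Nat) =>
        if arr.getD ip 0 > xsr.getD k 0 ∧
           acc < (pvEnds xsr).getD k 0 + arr.getD ip 0 then
          (pvEnds xsr).getD k 0 + arr.getD ip 0 else acc) (arr.getD ip 0) := by
    apply PySem.List.foldl_congr_mem
    intro acc k hk
    rw [List.mem_range] at hk
    have h0 : (n - 1) - (k : Int) = ((m - 1 - k : Nat) : Int) := by omega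
    rw [h0]
    simp only [PySem.List.pyGetD_natCast]
    rw [hbmid (m - 1 - k) (by omega) (by omega), hRvget (m - 1 - k) (by omega)]
    rw [hxsrget k (by omega)]
    have h1' : m - 1 - (m - 1 - k) = k := by omega
    rw [h1']
  rw [hcongr]
  have hsl := pvScalarLoop (fun k => xsr.getD k 0) (fun k => (pvEnds xsr).getD k 0)
      (arr.getD ip 0) (m - 1 - ip)
  rw [hsl]
  have ht0 : arr.getD ip 0 = xsr.getD (m - 1 - ip) 0 := by
    rw [hxsrget (m - 1 - ip) (by omega)]
    congr 1
    omega
  have hchar := pvEnds_getD xsr (m - 1 - ip) (by rw [hxsrlen]; omega)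
  rw [ht0, ← hchar, ← hRvget ip (by omega)]
  have htk : arr.take (ip + 1) = arr.take ip ++ [arr.getD ip 0] := by
    rw [List.take_add_one]
    congr 1
    rw [List.getElem?_eq_getElem (by omega), List.getD_eq_getElem arr 0 (by omega)]
    rfl
  have hdr : Rv.drop ip = Rv.getD ip 0 :: Rv.drop (ip + 1) := by
    rw [List.drop_eq_getElem_cons (by rw [hRvlen]; omega), List.getD_eq_getElem Rv 0 (by rw [hRvlen]; omega)]
  rw [hbase, htk, hdr]
  have hTlen : (arr.take ip).length = ip := by simp only [List.length_take]; omega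
  have hre : (arr.take ip ++ [arr.getD ip 0]) ++ Rv.drop (ip+1) ++ arr.drop m
      = arr.take ip ++ ([arr.getD ip 0] ++ (Rv.drop (ip+1) ++ arr.drop m)) := by
    simp [List.append_assoc]
  rw [hre, pvSetMid _ _ _ hTlen.symm]
  simp [List.append_assoc]

theorem pvSplitAt (l : List Int) (k : Nat) (h : k < l.length) :
    l = l.take k ++ [l.getD k 0] ++ l.drop (k+1) := by
  rw [List.getD_eq_getElem l 0 h]
  rw [show l.take k ++ [l[k]] ++ l.drop (k+1) = l.take k ++ (l[k] :: l.drop (k+1)) by simp]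
  rw [← List.drop_eq_getElem_cons h, List.take_append_drop]

theorem pvRightLoop (arr : List Int) (n : Int) (h1 : 1 ≤ n) (h2 : n ≤ (arr.length : Int)) :
    (PySem.List.pyRange (n-2) (-1) (-1)).foldl (fun rd i =>
        (PySem.List.pyRange (n-1) i (-1)).foldl (fun rd j =>
          if PySem.List.pyGetD arr i 0 > PySem.List.pyGetD arr j 0 ∧
             PySem.List.pyGetD rd i 0 < PySem.List.pyGetD rd j 0 + PySem.List.pyGetD arr i 0 then
            PySem.List.pySetD rd i (PySem.List.pyGetD rd j 0 + PySem.List.pyGetD arr i 0)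
          else rd) rd) arr
    = (pvEnds (arr.take n.toNat).reverse).reverse ++ arr.drop n.toNat := by
  set m := n.toNat with hm
  have hmlen : m ≤ arr.length := by omega
  have hm1 : 1 ≤ m := by omega
  set Rv := (pvEnds (arr.take m).reverse).reverse with hRv
  have hRvlen : Rv.length = m := by
    simp only [hRv, List.length_reverse, pvEnds_len, List.length_take]
    omega
  have hrange : PySem.List.pyRange (n-2) (-1) (-1)
      = (List.range (m - 1)).map (fun (k : Nat) => (n - 2) - (k : Int)) := by
    rw [PySem.List.pyRange_neg_one]
    congr 2
    omega
  rw [hrange, List.foldl_map]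
  have aux : ∀ t, t ≤ m - 1 →
      (List.range t).foldl (fun rd (k : Nat) =>
        (PySem.List.pyRange (n-1) ((n - 2) - (k : Int)) (-1)).foldl (fun rd j =>
          if PySem.List.pyGetD arr ((n - 2) - (k : Int)) 0 > PySem.List.pyGetD arr j 0 ∧
             PySem.List.pyGetD rd ((n - 2) - (k : Int)) 0 < PySem.List.pyGetD rd j 0 + PySem.List.pyGetD arr ((n - 2) - (k : Int)) 0 then
            PySem.List.pySetD rd ((n - 2) - (k : Int)) (PySem.List.pyGetD rd j 0 + PySem.List.pyGetD arr ((n - 2) - (k : Int)) 0)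
          else rd) rd) arr
      = arr.take (m - 1 - t) ++ Rv.drop (m - 1 - t) ++ arr.drop m := by
    intro t
    induction t with
    | zero =>
      intro _
      simp only [List.range_zero, List.foldl_nil]
      have hdrop : Rv.drop (m - 1) = [Rv.getD (m - 1) 0] := by
        rw [List.drop_eq_getElem_cons (by omega), List.getD_eq_getElem Rv 0 (by omega)]
        rw [show m - 1 + 1 = m by omega, List.drop_of_length_le (by omega)]
      have hRvlast : Rv.getD (m - 1) 0 = arr.getD (m - 1) 0 := by
        rw [hRv, pvGetD_rev _ _ (by rw [pvEnds_len]; simp only [List.length_reverse, List.length_take]; omega)]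
        rw [pvEnds_len, List.length_reverse]
        have e : (List.take m arr).length = m := by simp only [List.length_take]; omega
        rw [e, show m - 1 - (m - 1) = 0 by omega]
        rw [pvEnds_getD _ 0 (by simp only [List.length_reverse]; omega)]
        simp only [List.range_zero, List.filter_nil, List.map_nil, List.foldl_nil, add_zero]
        rw [pvGetD_rev _ _ (by rw [e]; omega), e, pvGetD_take _ (by omega), Nat.sub_zero]
      simp only [Nat.sub_zero]
      rw [hdrop, hRvlast]
      have := pvSplitAt arr (m - 1) (by omega)
      rw [show m - 1 + 1 = m by omega] at this
      exact this
    | succ t ih =>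
      intro ht
      rw [List.range_succ, List.foldl_append, ih (by omega), List.foldl_cons, List.foldl_nil]
      rw [show (n - 2) - (t : Int) = ((m - 2 - t : Nat) : Int) by omega]
      have hstep := pvRightStep arr n h1 h2 (m - 2 - t) (by omega)
      rw [show m - 1 - t = (m - 2 - t) + 1 by omega]
      rw [← hm] at hstep
      rw [← hRv] at hstep
      rw [hstep, show m - 1 - (t+1) = m - 2 - t by omega]
  rw [aux (m - 1) le_rfl]
  simp only [show m - 1 - (m - 1) = 0 by omega, List.take_zero, List.drop_zero, List.nil_append]

theorem pvLeftInit (arr : List Int) (h : 0 < arr.length) :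
    PySem.List.pySetD (arr.map (fun i => i)) 0 (PySem.List.pyGetD arr 0 0) = arr := by
  rw [List.map_id']
  rw [show (0:Int) = ((0:Nat):Int) from rfl]
  simp only [PySem.List.pySetD_natCast, PySem.List.pyGetD_natCast]
  exact pvSetGetSelf arr 0 h

theorem pvRightInit (arr : List Int) (n : Int) (h1 : 1 ≤ n) (h2 : n ≤ (arr.length : Int)) :
    PySem.List.pySetD (arr.map (fun i => i)) (n-1) (PySem.List.pyGetD arr (n-1) 0) = arr := by
  rw [List.map_id']
  rw [show n - 1 = ((n.toNat - 1 : Nat) : Int) by omega]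
  simp only [PySem.List.pySetD_natCast, PySem.List.pyGetD_natCast]
  exact pvSetGetSelf arr (n.toNat - 1) (by omega)

theorem pvZip3 (a b c : List Int) (hab : a.length = b.length) (hac : a.length = c.length) :
    (a.zip (b.zip c)).map (fun p => p.1 + p.2.1 - p.2.2)
    = (List.range a.length).map (fun k => a.getD k 0 + b.getD k 0 - c.getD k 0) := by
  induction a generalizing b c with
  | nil => simp
  | cons x a ih =>
    cases b with
    | nil => simp at hab
    | cons y b =>
      cases c with
      | nil => simp at hac
      | cons z c =>
        simp only [List.zip_cons_cons, List.map_cons, List.length_cons,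
          List.range_succ_eq_map, List.map_map]
        rw [List.cons_eq_cons]
        refine ⟨rfl, ?_⟩
        rw [ih b c (by simpa using hab) (by simpa using hac)]
        apply List.map_congr_left
        intro q _
        rfl

theorem pvFinalList (arr : List Int) (n : Int) (h1 : 1 ≤ n) (h2 : n ≤ (arr.length : Int)) :
    (PySem.List.pyRange 0 n 1).map (fun i =>
      PySem.List.pyGetD ((pvEnds arr).take n.toNat ++ arr.drop n.toNat) i 0
      + PySem.List.pyGetD ((pvEnds (arr.take n.toNat).reverse).reverse ++ arr.drop n.toNat) i 0
      - PySem.List.pyGetD arr i 0)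
    = ((pvEnds (arr.take n.toNat)).zip (((pvEnds (arr.take n.toNat).reverse).reverse).zip (arr.take n.toNat))).map
        (fun p => p.1 + p.2.1 - p.2.2) := by
  set m := n.toNat with hm
  have hmlen : m ≤ arr.length := by omega
  have etk : (arr.take m).length = m := by simp only [List.length_take]; omega
  have hEx : (pvEnds (arr.take m)).length = m := by rw [pvEnds_len]; exact etk
  have hRvlen : ((pvEnds (arr.take m).reverse).reverse).length = m := by
    simp only [List.length_reverse, pvEnds_len]
    exact etk
  rw [pvZip3 _ _ _ (by rw [hEx, hRvlen]) (by rw [hEx, etk]), hEx]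
  have hrange : PySem.List.pyRange 0 n 1 = (List.range m).map (fun (k : Nat) => (0 : Int) + (k : Int)) := by
    rw [PySem.List.pyRange_one]
    congr 2
    omega
  rw [hrange, List.map_map]
  apply List.map_congr_left
  intro k hk
  rw [List.mem_range] at hk
  simp only [Function.comp]
  rw [show (0 : Int) + (k : Int) = ((k : Nat) : Int) by omega]
  simp only [PySem.List.pyGetD_natCast]
  rw [pvGetD_append_left _ _ _ (by rw [List.length_take, pvEnds_len]; omega),
      pvGetD_append_left _ _ _ (by rw [hRvlen]; omega)]
  rw [pvEnds_take, pvGetD_take _ hk, pvGetD_take _ hk]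

-- ======= B-side: segment tree correctness =======

theorem pvFoldlMax_init (l : List Int) : ∀ a : Int, a ≤ l.foldl max a := by
  induction l with
  | nil => intro a; simp
  | cons x l ih => intro a; exact le_trans (le_max_left a x) (ih _)

theorem pvLeFoldlMax_of_mem {x : Int} {l : List Int} (h : x ∈ l) : ∀ a : Int, x ≤ l.foldl max a := by
  induction l with
  | nil => simp at h
  | cons y l ih =>
    intro a
    simp only [List.foldl_cons]
    rcases List.mem_cons.mp h with h1 | h2
    · subst h1; exact le_trans (le_max_right a x) (pvFoldlMax_init l _)
    · exact ih h2 _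

theorem pvFoldlMax_le {l : List Int} {c : Int} : ∀ a : Int, a ≤ c → (∀ x ∈ l, x ≤ c) → l.foldl max a ≤ c := by
  induction l with
  | nil => intro a ha _; simpa using ha
  | cons x l ih =>
    intro a ha h
    exact ih _ (max_le ha (h x List.mem_cons_self)) (fun y hy => h y (List.mem_cons_of_mem _ hy))

theorem pvFoldlMax_max (l : List Int) : ∀ a b : Int, l.foldl max (max a b) = max a (l.foldl max b) := by
  induction l with
  | nil => intro a b; rfl
  | cons x l ih =>
    intro a b
    simp only [List.foldl_cons]
    rw [max_assoc, ih]

theorem pvFoldlMax_shift (l : List Int) (a : Int) (ha : 0 ≤ a) :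
    l.foldl max a = max a (l.foldl max 0) := by
  rw [show a = max a 0 by omega, pvFoldlMax_max]
  congr 1
  omega

-- representation predicate: a tree of span 2^k stores f on positions [0, 2^k)
def pvRepr : Nat → pvST → (Int → Int) → Prop
  | 0, t, f => pvTop t = f 0 ∧ 0 ≤ f 0
  | k+1, t, f =>
      (t = pvST.nil ∧ ∀ q : Int, 0 ≤ q → q < (2:Int) ^ (k+1) → f q = 0) ∨
      (∃ m l r, t = pvST.node m l r ∧ m = max (pvTop l) (pvTop r) ∧
        pvRepr k l f ∧ pvRepr k r (fun q => f (q + (2:Int) ^ k)))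

-- max of f over positions i < p within [0, 2^k)
def pvMR (k : Nat) (f : Int → Int) (p : Int) : Int :=
  (((List.range (2 ^ k)).filter (fun i : Nat => decide ((i : Int) < p))).map (fun i : Nat => f (i : Int))).foldl max 0

theorem pvMR_nonneg (k : Nat) (f : Int → Int) (p : Int) : 0 ≤ pvMR k f p :=
  pvFoldlMax_init _ 0

theorem pvMR_nonpos (k : Nat) (f : Int → Int) (p : Int) (hp : p ≤ 0) : pvMR k f p = 0 := by
  unfold pvMR
  rw [List.filter_eq_nil_iff.mpr (by intro i _; simp; omega)]
  rfl

theorem pvPow_cast (k : Nat) : (((2 ^ k : Nat) : Int)) = (2:Int) ^ k := by push_cast; ring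

theorem pvMR_clamp (k : Nat) (f : Int → Int) (p : Int) (hp : (2:Int) ^ k ≤ p) :
    pvMR k f p = pvMR k f ((2:Int) ^ k) := by
  unfold pvMR
  congr 1
  apply congrArg
  apply List.filter_congr
  intro i hi
  rw [List.mem_range] at hi
  have : (i : Int) < (2:Int) ^ k := by
    have := pvPow_cast k
    omega
  simp only [decide_eq_decide]
  omega

theorem pvMR_zero (k : Nat) (f : Int → Int) (p : Int)
    (h : ∀ q : Int, 0 ≤ q → q < (2:Int) ^ k → f q = 0) : pvMR k f p = 0 := by
  have h1 : pvMR k f p ≤ 0 := by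
    apply pvFoldlMax_le _ le_rfl
    intro x hx
    rw [List.mem_map] at hx
    obtain ⟨i, hi, hfx⟩ := hx
    have hi2 := List.mem_of_mem_filter hi
    rw [List.mem_range] at hi2
    have : (i : Int) < (2:Int) ^ k := by have := pvPow_cast k; omega
    rw [← hfx, h _ (by omega) this]
  have := pvMR_nonneg k f p
  omega

theorem pvMR_split (k : Nat) (f : Int → Int) (p : Int) :
    pvMR (k+1) f p = max (pvMR k f p) (pvMR k (fun q => f (q + (2:Int) ^ k)) (p - (2:Int) ^ k)) := by
  unfold pvMR
  have hsplit : List.range (2 ^ (k+1)) = List.range (2 ^ k) ++ (List.range (2 ^ k)).map (fun j => 2 ^ k + j) := by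
    rw [show (2:Nat) ^ (k+1) = 2 ^ k + 2 ^ k by ring, List.range_add]
  rw [hsplit, List.filter_append, List.map_append, List.foldl_append]
  rw [pvFoldlMax_shift _ _ (pvFoldlMax_init _ 0)]
  congr 1
  rw [List.filter_map, List.map_map]
  have hfe : (List.range (2 ^ k)).filter ((fun i : Nat => decide ((i:Int) < p)) ∘ (fun j => 2 ^ k + j))
      = (List.range (2 ^ k)).filter (fun j : Nat => decide ((j : Int) < p - (2:Int)^k)) := by
    apply List.filter_congr
    intro j _
    simp only [Function.comp, decide_eq_decide]
    have : (((2 ^ k + j : Nat)) : Int) = (j : Int) + (2:Int) ^ k := by push_cast; ring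
    omega
  rw [hfe]
  apply congrArg (fun l => List.foldl max 0 l)
  apply List.map_congr_left
  intro j _
  simp only [Function.comp]
  have : (((2 ^ k + j : Nat)) : Int) = (j : Int) + (2:Int) ^ k := by push_cast; ring
  rw [this]

theorem pvTopQuery (k : Nat) (t : pvST) : pvQuery k t ((2:Int) ^ k) = pvTop t := by
  cases k with
  | zero =>
    by_cases hnil : t = pvST.nil
    · subst hnil; simp [pvQuery, pvTop]
    · simp only [pvQuery]
      rw [if_neg (not_or.mpr ⟨hnil, by norm_num⟩), if_pos le_rfl]
  | succ k =>
    have hpos : (0:Int) < (2:Int) ^ (k+1) := by positivity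
    by_cases hnil : t = pvST.nil
    · subst hnil; simp [pvQuery, pvTop]
    · simp only [pvQuery]
      rw [if_neg (not_or.mpr ⟨hnil, by omega⟩), if_pos le_rfl]

theorem pvReprNil : ∀ (k : Nat) (f : Int → Int),
    (∀ q : Int, 0 ≤ q → q < (2:Int) ^ k → f q = 0) → pvRepr k pvST.nil f := by
  intro k f h
  cases k with
  | zero =>
    constructor
    · rw [h 0 le_rfl (by norm_num)]; rfl
    · rw [h 0 le_rfl (by norm_num)]
  | succ k => exact Or.inl ⟨rfl, h⟩

theorem pvReprCongr : ∀ (k : Nat) (t : pvST) (f g : Int → Int),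
    pvRepr k t f → (∀ q : Int, 0 ≤ q → q < (2:Int) ^ k → f q = g q) → pvRepr k t g := by
  intro k
  induction k with
  | zero =>
    intro t f g hr h
    obtain ⟨h1, h2⟩ := hr
    have := h 0 le_rfl (by norm_num)
    exact ⟨by rw [h1, this], by rw [← this]; exact h2⟩
  | succ k ih =>
    intro t f g hr h
    have hp : (2:Int) ^ (k+1) = (2:Int) ^ k + (2:Int) ^ k := by ring
    have hpos : (0:Int) < (2:Int) ^ k := by positivity
    rcases hr with ⟨hnil, hz⟩ | ⟨m, l, r, ht, hm, hl, hrr⟩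
    · exact Or.inl ⟨hnil, fun q hq1 hq2 => by rw [← h q hq1 hq2]; exact hz q hq1 hq2⟩
    · refine Or.inr ⟨m, l, r, ht, hm, ih l f g hl (fun q hq1 hq2 => h q hq1 (by omega)), ?_⟩
      exact ih r _ _ hrr (fun q hq1 hq2 => h (q + (2:Int)^k) (by omega) (by omega))

theorem pvReprQuery : ∀ (k : Nat) (t : pvST) (f : Int → Int),
    pvRepr k t f → ∀ p : Int, pvQuery k t p = pvMR k f p := by
  intro k
  induction k with
  | zero =>
    intro t f hr p
    obtain ⟨htop, hnn⟩ := hr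
    have hMR : pvMR 0 f p = if (0:Int) < p then f 0 else 0 := by
      unfold pvMR
      by_cases h0 : (0:Int) < p
      · simp [List.range_one, h0, hnn]
      · simp [List.range_one, h0]
    by_cases hnil : t = pvST.nil
    · subst hnil
      have hf0 : f 0 = 0 := by simpa [pvTop] using htop.symm
      simp [pvQuery, hMR, hf0]
    · by_cases hp : p ≤ 0
      · rw [hMR]
        simp [pvQuery, hp]
      · rw [hMR]
        simp only [pvQuery]
        rw [if_neg (not_or.mpr ⟨hnil, hp⟩), if_pos (by norm_num; omega), htop,
          if_pos (by omega)]
  | succ k ih =>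
    intro t f hr p
    have hp2 : (2:Int) ^ (k+1) = (2:Int) ^ k + (2:Int) ^ k := by ring
    have hpos : (0:Int) < (2:Int) ^ k := by positivity
    rcases hr with ⟨hnil, hz⟩ | ⟨m, l, r, ht, hm, hl, hrr⟩
    · subst hnil
      rw [pvMR_zero _ _ _ hz]
      simp [pvQuery]
    · subst ht
      have hLq := ih l f hl
      have hRq := ih r _ hrr
      have hLtop : pvTop l = pvMR k f ((2:Int)^k) := by rw [← pvTopQuery k l, hLq]
      have hRtop : pvTop r = pvMR k (fun q => f (q + (2:Int)^k)) ((2:Int)^k) := by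
        rw [← pvTopQuery k r, hRq]
      by_cases hple : p ≤ 0
      · rw [pvMR_nonpos _ _ _ hple]
        simp [pvQuery, hple]
      · by_cases hbig : (2:Int) ^ (k+1) ≤ p
        · have hqv : pvQuery (k+1) (pvST.node m l r) p = m := by
            simp [pvQuery, pvTop, hple, hbig]
          rw [hqv, hm, pvMR_split, hLtop, hRtop,
            ← pvMR_clamp k f p (by omega), ← pvMR_clamp k _ (p - (2:Int)^k) (by omega)]
        · by_cases hhalf : p ≤ (2:Int) ^ k
          · have hqv : pvQuery (k+1) (pvST.node m l r) p = pvQuery k l p := by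
              simp [pvQuery, hple, hbig, hhalf, pvChildL]
            rw [hqv, hLq, pvMR_split, pvMR_nonpos k _ (p - (2:Int)^k) (by omega)]
            have := pvMR_nonneg k f p
            omega
          · have hqv : pvQuery (k+1) (pvST.node m l r) p
                = max (pvTop l) (pvQuery k r (p - (2:Int)^k)) := by
              simp [pvQuery, hple, hbig, hhalf, pvChildL, pvChildR]
            rw [hqv, hRq, pvMR_split, hLtop, ← pvMR_clamp k f p (by omega)]
  
theorem pvReprUpdate : ∀ (k : Nat) (t : pvST) (f : Int → Int) (pos s : Int),
    pvRepr k t f → 0 ≤ pos → pos < (2:Int) ^ k →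
    pvRepr k (pvUpdate k t pos s) (fun q => if q = pos then max (f pos) s else f q) := by
  intro k
  induction k with
  | zero =>
    intro t f pos s hr h0 h1
    have hpos0 : pos = 0 := by norm_num at h1; omega
    subst hpos0
    obtain ⟨htop, hnn⟩ := hr
    refine ⟨?_, ?_⟩
    · show max (pvTop t) s = _
      simp [htop]
    · have hred : (fun q : Int => if q = 0 then max (f 0) s else f q) 0 = max (f 0) s := by simp
      rw [hred]
      omega
  | succ k ih =>
    intro t f pos s hr h0 h1
    have hp2 : (2:Int) ^ (k+1) = (2:Int) ^ k + (2:Int) ^ k := by ring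
    have hpos : (0:Int) < (2:Int) ^ k := by positivity
    rcases hr with ⟨hnil, hz⟩ | ⟨m, l, r, ht, hm, hl, hrr⟩
    · subst hnil
      have hL : pvRepr k pvST.nil f := pvReprNil k f (fun q hq1 hq2 => hz q hq1 (by omega))
      have hR : pvRepr k pvST.nil (fun q => f (q + (2:Int)^k)) :=
        pvReprNil k _ (fun q hq1 hq2 => hz _ (by omega) (by omega))
      by_cases hc : pos < (2:Int) ^ k
      · have hstep := ih pvST.nil f pos s hL h0 hc
        have hupd : pvUpdate (k+1) pvST.nil pos s
            = pvST.node (max (pvTop (pvUpdate k pvST.nil pos s)) (pvTop pvST.nil))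
                (pvUpdate k pvST.nil pos s) pvST.nil := by
          simp [pvUpdate, pvChildL, pvChildR, hc]
        refine Or.inr ⟨_, _, _, hupd, rfl, hstep, ?_⟩
        apply pvReprCongr k _ _ _ hR
        intro q hq1 hq2
        beta_reduce
        rw [if_neg (by omega)]
      · have hstep := ih pvST.nil (fun q => f (q + (2:Int)^k)) (pos - (2:Int)^k) s hR (by omega) (by omega)
        have hupd : pvUpdate (k+1) pvST.nil pos s
            = pvST.node (max (pvTop pvST.nil) (pvTop (pvUpdate k pvST.nil (pos - (2:Int)^k) s)))
                pvST.nil (pvUpdate k pvST.nil (pos - (2:Int)^k) s) := by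
          simp [pvUpdate, pvChildL, pvChildR, hc]
        refine Or.inr ⟨_, _, _, hupd, rfl, ?_, ?_⟩
        · apply pvReprCongr k _ _ _ hL
          intro q hq1 hq2
          beta_reduce
          rw [if_neg (by omega)]
        · apply pvReprCongr k _ _ _ hstep
          intro q hq1 hq2
          beta_reduce
          by_cases he : q = pos - (2:Int)^k
          · rw [if_pos he, if_pos (by omega)]
            congr 2
            omega
          · rw [if_neg he, if_neg (by omega)]
    · subst ht
      by_cases hc : pos < (2:Int) ^ k
      · have hstep := ih l f pos s hl h0 hc
        have hupd : pvUpdate (k+1) (pvST.node m l r) pos s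
            = pvST.node (max (pvTop (pvUpdate k l pos s)) (pvTop r)) (pvUpdate k l pos s) r := by
          simp [pvUpdate, pvChildL, pvChildR, hc]
        refine Or.inr ⟨_, _, _, hupd, rfl, hstep, ?_⟩
        apply pvReprCongr k _ _ _ hrr
        intro q hq1 hq2
        beta_reduce
        rw [if_neg (by omega)]
      · have hstep := ih r (fun q => f (q + (2:Int)^k)) (pos - (2:Int)^k) s hrr (by omega) (by omega)
        have hupd : pvUpdate (k+1) (pvST.node m l r) pos s
            = pvST.node (max (pvTop l) (pvTop (pvUpdate k r (pos - (2:Int)^k) s)))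
                l (pvUpdate k r (pos - (2:Int)^k) s) := by
          simp [pvUpdate, pvChildL, pvChildR, hc]
        refine Or.inr ⟨_, _, _, hupd, rfl, ?_, ?_⟩
        · apply pvReprCongr k _ _ _ hl
          intro q hq1 hq2
          beta_reduce
          rw [if_neg (by omega)]
        · apply pvReprCongr k _ _ _ hstep
          intro q hq1 hq2
          beta_reduce
          by_cases he : q = pos - (2:Int)^k
          · rw [if_pos he, if_pos (by omega)]
            congr 2
            omega
          · rw [if_neg he, if_neg (by omega)]

-- values stored at a given position
def pvF (l : List (Int × Int)) (q : Int) : Int :=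
  ((l.filter (fun p => decide (p.1 + 2147483648 = q))).map Prod.snd).foldl max 0

theorem pvF_append (l : List (Int × Int)) (v s q : Int) :
    pvF (l ++ [(v, s)]) q = if v + 2147483648 = q then max (pvF l q) s else pvF l q := by
  unfold pvF
  rw [List.filter_append]
  by_cases h : v + 2147483648 = q
  · rw [if_pos h]
    simp only [List.filter_cons, List.filter_nil, decide_eq_true_eq, if_pos h]
    rw [List.map_append, List.foldl_append]
    rfl
  · rw [if_neg h]
    simp only [List.filter_cons, List.filter_nil, decide_eq_true_eq, if_neg h]
    simp

theorem pvPow33 : (2:Int) ^ (33:Nat) = 8589934592 := by norm_num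

-- the tree query reproduces the functional DP's candidate maximum
theorem pvRegroup (l : List (Int × Int)) (v : Int)
    (hb : ∀ p ∈ l, -2147483648 ≤ p.1 ∧ p.1 ≤ 2147483648) :
    pvMR 33 (pvF l) (v + 2147483648)
    = ((l.filter (fun p => p.1 < v)).map Prod.snd).foldl max 0 := by
  apply le_antisymm
  · apply pvFoldlMax_le _ (pvFoldlMax_init _ 0)
    intro x hx
    rw [List.mem_map] at hx
    obtain ⟨i, hi, hfx⟩ := hx
    have hilt : (i : Int) < v + 2147483648 := by
      have := List.mem_filter.mp hi
      simpa using this.2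
    rw [← hfx]
    apply pvFoldlMax_le _ (pvFoldlMax_init _ 0)
    intro y hy
    rw [List.mem_map] at hy
    obtain ⟨pr, hpr, hy2⟩ := hy
    have hpr2 := List.mem_filter.mp hpr
    have hpos : pr.1 + 2147483648 = (i : Int) := by simpa using hpr2.2
    have hlt : pr.1 < v := by omega
    rw [← hy2]
    apply pvLeFoldlMax_of_mem
    exact List.mem_map.mpr ⟨pr, List.mem_filter.mpr ⟨hpr2.1, by simpa using hlt⟩, rfl⟩
  · apply pvFoldlMax_le _ (pvMR_nonneg _ _ _)
    intro x hx
    rw [List.mem_map] at hx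
    obtain ⟨pr, hpr, hx2⟩ := hx
    have hpr2 := List.mem_filter.mp hpr
    have hlt : pr.1 < v := by simpa using hpr2.2
    obtain ⟨hlo, hhi⟩ := hb pr hpr2.1
    set iN : Nat := (pr.1 + 2147483648).toNat with hiN
    have hcast : (iN : Int) = pr.1 + 2147483648 := by omega
    have hle : x ≤ pvF l (iN : Int) := by
      rw [← hx2]
      apply pvLeFoldlMax_of_mem
      exact List.mem_map.mpr ⟨pr, List.mem_filter.mpr ⟨hpr2.1, by simp [hcast]⟩, rfl⟩
    refine le_trans hle ?_
    apply pvLeFoldlMax_of_mem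
    apply List.mem_map.mpr
    refine ⟨iN, List.mem_filter.mpr ⟨?_, ?_⟩, rfl⟩
    · rw [List.mem_range]
      have := pvPow_cast 33
      rw [pvPow33] at this
      omega
    · simp only [decide_eq_true_eq]
      omega

-- sweep invariant: the output list is pvEnds and the tree represents the stored sums
theorem pvSweepInv (xs : List Int)
    (hb : ∀ v ∈ xs, -2147483648 ≤ v ∧ v ≤ 2147483648) :
    (xs.foldl pvSweepStep (pvST.nil, [])).2 = pvEnds xs ∧
    pvRepr 33 (xs.foldl pvSweepStep (pvST.nil, [])).1 (pvF (xs.zip (pvEnds xs))) := by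
  induction xs using List.reverseRecOn with
  | nil =>
    constructor
    · rfl
    · exact pvReprNil 33 _ (fun q _ _ => rfl)
  | append_singleton xs v ih =>
    have hbxs : ∀ u ∈ xs, -2147483648 ≤ u ∧ u ≤ 2147483648 :=
      fun u hu => hb u (List.mem_append_left _ hu)
    obtain ⟨hout, hrep⟩ := ih hbxs
    obtain ⟨hv1, hv2⟩ := hb v (List.mem_append_right _ List.mem_cons_self)
    rw [List.foldl_append, List.foldl_cons, List.foldl_nil]
    set st := xs.foldl pvSweepStep (pvST.nil, []) with hst
    have hq : pvQuery 33 st.1 (v + 2147483648)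
        = (((xs.zip (pvEnds xs)).filter (fun p => p.1 < v)).map Prod.snd).foldl max 0 := by
      rw [pvReprQuery 33 st.1 _ hrep, pvRegroup _ v (by
        intro p hp
        exact hbxs p.1 (List.of_mem_zip hp).1)]
    set s := v + (((xs.zip (pvEnds xs)).filter (fun p => p.1 < v)).map Prod.snd).foldl max 0 with hs
    have hends : pvEnds (xs ++ [v]) = pvEnds xs ++ [s] := by
      rw [pvEnds_snoc]; rfl
    have hzip : (xs ++ [v]).zip (pvEnds (xs ++ [v])) = (xs.zip (pvEnds xs)) ++ [(v, s)] := by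
      rw [hends, List.zip_append (by rw [pvEnds_len])]
      rfl
    constructor
    · show (st.2 ++ [v + pvQuery 33 st.1 (v + 2147483648)]) = pvEnds (xs ++ [v])
      rw [hq, hout, hends]
    · show pvRepr 33 (pvUpdate 33 st.1 (v + 2147483648) (v + pvQuery 33 st.1 (v + 2147483648))) _
      rw [hq, ← hs]
      have hupd := pvReprUpdate 33 st.1 _ (v + 2147483648) s hrep (by omega)
        (by rw [pvPow33]; omega)
      apply pvReprCongr 33 _ _ _ hupd
      intro q _ _
      rw [hzip, pvF_append]
      by_cases he : q = v + 2147483648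
      · rw [if_pos he, if_pos (by omega)]
        congr 1
        rw [he]
      · rw [if_neg he, if_neg (by omega)]

theorem pvPrefixRange (arr : List Int) (n : Int) (h1 : 0 ≤ n) (h2 : n ≤ (arr.length : Int)) :
    (PySem.List.pyRange 0 n 1).map (fun i => PySem.List.pyGetD arr i 0) = arr.take n.toNat := by
  rw [show PySem.List.pyRange 0 n 1 = (List.range n.toNat).map (fun (k : Nat) => (0 : Int) + (k : Int)) by
    rw [PySem.List.pyRange_one]; congr 2; omega]
  rw [List.map_map]
  apply List.ext_getElem (by simp only [List.length_map, List.length_range, List.length_take]; omega)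
  intro k hk1 hk2
  simp only [List.getElem_map, List.getElem_range, Function.comp, List.getElem_take]
  rw [show (0 : Int) + (k : Int) = ((k : Nat) : Int) by omega]
  simp only [PySem.List.pyGetD_natCast]
  rw [List.getD_eq_getElem arr 0 (by simp only [List.length_map, List.length_range] at hk1; omega)]

theorem pvSweep_eq_pvEnds (xs : List Int)
    (hb : ∀ v ∈ xs, -2147483648 ≤ v ∧ v ≤ 2147483648) : pvSweep xs = pvEnds xs :=
  (pvSweepInv xs hb).1

-- ===== VERDICT (by name: the statement is the Claim_ definition above) =====
theorem bitonicSubsequence_spec : Claim_equal_bitonicSubsequence := by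
  intro arr n hdom hpre
  obtain ⟨h1, h2⟩ := hpre
  have hb : ∀ v ∈ arr, -2147483648 ≤ v ∧ v ≤ 2147483648 := by
    unfold Dom_bitonicSubsequence at hdom
    simp only [Bool.and_eq_true, List.all_eq_true, pvDomInt, decide_eq_true_eq] at hdom
    exact fun v hv => hdom.1 v hv
  have e1 : (PySem.List.pyRange 0 n 1).map (fun i => PySem.List.pyGetD arr i 0) = arr.take n.toNat :=
    pvPrefixRange arr n (by omega) h2
  have e2 : pvSweep (arr.take n.toNat) = pvEnds (arr.take n.toNat) :=
    pvSweep_eq_pvEnds _ (fun v hv => hb v (List.mem_of_mem_take hv))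
  have e3 : pvSweep ((arr.take n.toNat).reverse) = pvEnds ((arr.take n.toNat).reverse) :=
    pvSweep_eq_pvEnds _ (fun v hv => hb v (List.mem_of_mem_take (List.mem_reverse.mp hv)))
  show bitonicSubsequence arr n = bitonicSubsequence_alt arr n
  unfold bitonicSubsequence bitonicSubsequence_alt
  simp only [e1, PySem.List.slice?_none_none_neg_one, Option.getD_some, e2, e3,
    pvLeftInit arr (by omega), pvRightInit arr n h1 h2,
    pvLeftLoop arr n h1 h2, pvRightLoop arr n h1 h2]
  rw [pvFinalList arr n h1 h2]
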